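-- pv_equiv track=rewrite | github.com/trajkan/NordhealthTask | senior_python_developer/main.py | find_equal_sum_pairs
-- ===== SOURCE A (Python) =====
-- from itertools import combinations
-- from collections import defaultdict
--
-- def find_equal_sum_pairs(arr: list) -> list:
--     """
--     Finds all pairs of numbers in the array that have the same sum and
--     groups them by the sum
--     """
--     if not isinstance(arr, list) or not all(isinstance(x, int) for x in arr):
--         raise ValueError("Input must be a list of integers.")
--     if len(arr) < 2:
--         raise ValueError("Input array must contain at least two elements.")
--
--     sum_to_pairs = defaultdict(list)
--     for a, b in combinations(arr, 2):
--         pair = (a, b)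
--         sum_to_pairs[a+b].append(pair)
--
--     filtered_sums = ((s, pairs) for s, pairs in sum_to_pairs.items() if len(pairs)>=2)
--     sorted_sum_to_pairs = sorted(filtered_sums, key=lambda x:x[0])
--
--     return sorted_sum_to_pairs
-- ===== SOURCE B (Python) =====
-- from itertools import combinations, groupby
--
-- def find_equal_sum_pairs(arr: list) -> list:
--     """
--     Finds all pairs of numbers in the array that have the same sum and
--     groups them by the sum
--     """
--     if not isinstance(arr, list) or not all(isinstance(x, int) for x in arr):
--         raise ValueError("Input must be a list of integers.")
--     if len(arr) < 2:
--         raise ValueError("Input array must contain at least two elements.")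
--
--     pairs = sorted(combinations(arr, 2), key=lambda p: p[0] + p[1])
--     result = []
--     for s, run in groupby(pairs, key=lambda p: p[0] + p[1]):
--         group = list(run)
--         if len(group) >= 2:
--             result.append((s, group))
--     return result
-- ===== Notes on version B (the rewrite author's own statement) =====
-- stated objective: alternative
-- what changed: Replaces the defaultdict hash-grouping followed by a sort of the groups with a single stable sort of the flat pair list keyed on the pair-sum followed by itertools.groupby to form the groups consecutively; Pre_ only excludes lists of fewer than two elements, on which both raise ValueError.
import Mathlib
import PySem

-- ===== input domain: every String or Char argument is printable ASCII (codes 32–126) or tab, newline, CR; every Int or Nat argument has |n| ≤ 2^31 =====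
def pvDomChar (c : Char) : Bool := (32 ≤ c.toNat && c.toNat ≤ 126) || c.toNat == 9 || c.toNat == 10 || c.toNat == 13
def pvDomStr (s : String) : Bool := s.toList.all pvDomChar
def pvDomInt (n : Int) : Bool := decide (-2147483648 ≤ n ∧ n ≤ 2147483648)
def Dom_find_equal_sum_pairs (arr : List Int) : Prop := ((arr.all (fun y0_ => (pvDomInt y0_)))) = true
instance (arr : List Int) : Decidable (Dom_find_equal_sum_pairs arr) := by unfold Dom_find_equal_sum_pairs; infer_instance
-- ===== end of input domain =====

-- B replaces A's defaultdict grouping followed by a sort of the groups with one stable sort of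
-- the flat pair list keyed on the pair-sum followed by a groupby pass; objective: alternative.

-- ===== PORT A =====
-- list(itertools.combinations(arr, 2)) as int pairs, in CPython order (both Pythons call it)
def pvPairs : List Int → List (Int × Int)
  | [] => []
  | x :: xs => xs.map (fun y => (x, y)) ++ pvPairs xs

def find_equal_sum_pairs (arr : List Int) : List (Int × (List (Int × Int))) :=
  let d : PySem.Dict Int (List (Int × Int)) :=
    (pvPairs arr).foldl (fun d p => d.modify (p.1 + p.2) [] (fun l => l ++ [p])) PySem.Dict.empty
  let filtered := d.items.filter (fun sp => decide (2 ≤ sp.2.length))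
  PySem.List.sorted filtered (fun x => x.1)

-- ===== PORT B =====
-- hand port of itertools.groupby(·, key=pair-sum): maximal consecutive runs of equal pair-sum
def pvGroupRuns : List (Int × Int) → List (Int × (List (Int × Int)))
  | [] => []
  | p :: t =>
    match pvGroupRuns t with
    | [] => [(p.1 + p.2, [p])]
    | (s, g) :: r =>
      if p.1 + p.2 = s then (s, p :: g) :: r else (p.1 + p.2, [p]) :: (s, g) :: r

def find_equal_sum_pairs_alt (arr : List Int) : List (Int × (List (Int × Int))) :=
  let qs := PySem.List.sorted (pvPairs arr) (fun p => p.1 + p.2)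
  (pvGroupRuns qs).filter (fun sp => decide (2 ≤ sp.2.length))

-- ===== PRECONDITION & SPEC =====
-- Pre_ excludes exactly the lists of fewer than two elements, on which the Python A raises ValueError.
def Pre_find_equal_sum_pairs (arr : List Int) : Prop := 2 ≤ arr.length
instance (arr : List Int) : Decidable (Pre_find_equal_sum_pairs arr) := by unfold Pre_find_equal_sum_pairs; infer_instance
def pvWitness_find_equal_sum_pairs : List Int := [1, 2, 3, 0]

def Spec_find_equal_sum_pairs (arr : List Int) (out : List (Int × (List (Int × Int)))) : Prop := out = find_equal_sum_pairs_alt arr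
instance (arr : List Int) (out : List (Int × (List (Int × Int)))) : Decidable (Spec_find_equal_sum_pairs arr out) := by unfold Spec_find_equal_sum_pairs; infer_instance

-- ===== CLAIM (what is proved, stated in full; the proofs are below) =====
def Claim_equal_find_equal_sum_pairs : Prop := ∀ (arr : List Int), Dom_find_equal_sum_pairs arr → Pre_find_equal_sum_pairs arr → Spec_find_equal_sum_pairs arr (find_equal_sum_pairs arr)

-- ===== LEMMAS AND PROOFS =====

-- inserting x into a key-sorted list and then keeping one key class appends x to that class (if it is x's)
theorem pv_insertBy_filter {α : Type} (key : α → Int) (s : Int) (x : α) (ys : List α)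
    (h : ys.Pairwise (fun a b => key a ≤ key b)) :
    (PySem.List.insertBy (fun a b => decide (key a < key b)) x ys).filter (fun z => key z == s)
      = if key x == s then ys.filter (fun z => key z == s) ++ [x]
        else ys.filter (fun z => key z == s) := by
  induction ys with
  | nil =>
    rw [PySem.List.insertBy]
    by_cases hx : key x == s <;> simp [List.filter, hx]
  | cons y t ih =>
    rw [List.pairwise_cons] at h
    obtain ⟨h1, h2⟩ := h
    rw [PySem.List.insertBy]
    by_cases hlt : key x < key y
    · simp only [decide_eq_true_eq, if_pos hlt]
      by_cases hx : key x == s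
      · have hs : key x = s := by simpa using hx
        have hy : ¬ (key y == s) = true := by simp only [beq_iff_eq]; omega
        have hnt : List.filter (fun z => key z == s) t = [] := by
          rw [List.filter_eq_nil_iff]
          intro z hz
          have := h1 z hz
          simp only [beq_iff_eq]
          omega
        simp [hx, hy, hnt]
      · simp [List.filter_cons, hx]
    · simp only [decide_eq_true_eq, if_neg hlt]
      rw [List.filter_cons, ih h2]
      by_cases hx : key x == s <;> by_cases hy : (key y == s) = true <;>
        simp [hx, hy]

-- stability of the sort restricted to one key class
theorem pv_sorted_filter_key {α : Type} (key : α → Int) (s : Int) (xs : List α) :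
    (PySem.List.sorted xs key).filter (fun z => key z == s) = xs.filter (fun z => key z == s) := by
  induction xs using List.reverseRecOn with
  | nil => simp [PySem.List.sorted_eq_foldl_insertBy]
  | append_singleton xs x ih =>
    rw [PySem.List.sorted_eq_foldl_insertBy, List.foldl_append, List.foldl_cons, List.foldl_nil,
      ← PySem.List.sorted_eq_foldl_insertBy,
      pv_insertBy_filter key s x _ (PySem.List.sorted_pairwise xs key), ih]
    by_cases hx : key x == s <;> simp [List.filter_append, List.filter, hx]

-- grouping a key-sorted pair list: the groups are exactly the key classes, keys strictly increasing
theorem pv_groupRuns_spec (qs : List (Int × Int))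
    (h : qs.Pairwise (fun a b => a.1 + a.2 ≤ b.1 + b.2)) :
    ∃ K : List Int,
      pvGroupRuns qs = K.map (fun s => (s, qs.filter (fun p => p.1 + p.2 == s)))
      ∧ K.Pairwise (· < ·)
      ∧ (∀ x, x ∈ K ↔ x ∈ qs.map (fun p => p.1 + p.2)) := by
  induction qs with
  | nil => exact ⟨[], by simp [pvGroupRuns]⟩
  | cons p t ih =>
    rw [List.pairwise_cons] at h
    obtain ⟨hp, ht⟩ := h
    obtain ⟨K, heq, hpw, hmem⟩ := ih ht
    match hK : K with
    | [] =>
      -- t has no keys, so t = []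
      have ht0 : t = [] := by
        cases t with
        | nil => rfl
        | cons q t' =>
          exfalso
          have := (hmem (q.1 + q.2)).mpr (by simp)
          simp at this
      subst ht0
      refine ⟨[p.1 + p.2], ?_, by simp, by simp⟩
      simp [pvGroupRuns]
    | s :: r =>
      subst hK
      have hgt : pvGroupRuns t = (s, t.filter (fun q => q.1 + q.2 == s)) :: r.map (fun s => (s, t.filter (fun q => q.1 + q.2 == s))) := by
        simpa using heq
      have hsmem : s ∈ t.map (fun p => p.1 + p.2) := (hmem s).mp (by simp)
      obtain ⟨w, hw, hws⟩ := List.mem_map.mp hsmem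
      have hks : p.1 + p.2 ≤ s := hws ▸ hp w hw
      by_cases hcase : p.1 + p.2 = s
      · -- merge into the head group
        refine ⟨s :: r, ?_, hpw, ?_⟩
        · show pvGroupRuns (p :: t) = _
          rw [pvGroupRuns, hgt]
          simp only [if_pos hcase]
          have hhead : (p :: t).filter (fun q => q.1 + q.2 == s) = p :: t.filter (fun q => q.1 + q.2 == s) := by
            simp [hcase]
          rw [List.map_cons, hhead]
          congr 1
          apply List.map_congr_left
          intro s' hs'
          have hlt : s < s' := (List.pairwise_cons.mp hpw).1 s' hs'
          have : ¬ (p.1 + p.2 == s') = true := by simp only [beq_iff_eq]; omega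
          simp [this]
        · intro x
          rw [hmem x]
          constructor
          · intro hx; exact List.mem_cons_of_mem _ hx
          · intro hx
            rcases List.mem_cons.mp hx with hx | hx
            · show x ∈ List.map (fun p => p.1 + p.2) t
              have hx' : x = s := by simpa [hcase] using hx
              rw [hx']; exact hsmem
            · exact hx
      · -- new singleton group in front
        have hklt : p.1 + p.2 < s := lt_of_le_of_ne hks hcase
        have hknot : p.1 + p.2 ∉ t.map (fun q => q.1 + q.2) := by
          intro hc
          rcases List.mem_cons.mp ((hmem _).mpr hc) with hc' | hc'
          · exact hcase hc'
          · have := (List.pairwise_cons.mp hpw).1 _ hc'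
            omega
        refine ⟨(p.1 + p.2) :: s :: r, ?_, ?_, ?_⟩
        · show pvGroupRuns (p :: t) = _
          rw [pvGroupRuns, hgt]
          simp only [if_neg hcase]
          have hnt : t.filter (fun q => q.1 + q.2 == p.1 + p.2) = [] := by
            rw [List.filter_eq_nil_iff]
            intro z hz hc
            exact hknot (List.mem_map.mpr ⟨z, hz, by simpa using hc⟩)
          have hcongr : ∀ s' ∈ (s :: r : List Int), (p :: t).filter (fun q => q.1 + q.2 == s') = t.filter (fun q => q.1 + q.2 == s') := by
            intro s' hs'
            have hne : p.1 + p.2 ≠ s' := by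
              intro he
              exact hknot (by
                have := (hmem s').mp hs'
                simpa [he] using this)
            simp [hne]
          rw [List.map_cons]
          congr 1
          · simp [hnt]
          · rw [show (List.map (fun s' => (s', List.filter (fun q => q.1 + q.2 == s') (p :: t))) (s :: r))
                  = List.map (fun s' => (s', List.filter (fun q => q.1 + q.2 == s') t)) (s :: r) from
                List.map_congr_left (fun s' hs' => by rw [hcongr s' hs']), List.map_cons]
        · rw [List.pairwise_cons]
          refine ⟨?_, hpw⟩
          intro x hx
          have hxmem := (hmem x).mp hx
          obtain ⟨w', hw', hw's⟩ := List.mem_map.mp hxmem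
          have hle : p.1 + p.2 ≤ x := hw's ▸ hp w' hw'
          have hne : p.1 + p.2 ≠ x := fun he => hknot (he ▸ hxmem)
          omega
        · intro x
          simp only [List.map_cons, List.mem_cons]
          rw [← hmem x]
          simp only [List.mem_cons]

-- the two ports agree on every input
theorem pv_main (arr : List Int) : find_equal_sum_pairs arr = find_equal_sum_pairs_alt arr := by
  let g : Int → Int × List (Int × Int) := fun s => (s, (pvPairs arr).filter (fun p => p.1 + p.2 == s))
  let pd : Int → Bool := fun s => decide (2 ≤ ((pvPairs arr).filter (fun p => p.1 + p.2 == s)).length)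
  let dd : PySem.Dict Int (List (Int × Int)) :=
    (pvPairs arr).foldl (fun d p => d.modify (p.1 + p.2) [] (fun l => l ++ [p])) PySem.Dict.empty
  let S : List Int := PySem.Set.ofList ((pvPairs arr).map (fun p => p.1 + p.2))
  -- A side: dict keys and values
  have hkeys : dd.keys = S := by
    have h1 := PySem.Dict.keys_foldl_modify_key (pvPairs arr) (fun p => p.1 + p.2)
      ([] : List (Int × Int)) (fun _ p => fun l => l ++ [p]) PySem.Dict.empty
    simpa [PySem.Set.update, PySem.Set.ofList, dd, S] using h1
  have hnodup : dd.keys.Nodup := by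
    apply PySem.Dict.nodup_keys_foldl_modify_key
    simp
  have hgetD : ∀ c, dd.getD c [] = (pvPairs arr).filter (fun p => p.1 + p.2 == c) := by
    intro c
    have h1 : dd = ((pvPairs arr).map (fun p => ((p.1 + p.2 : Int), p))).foldl
        (fun d q => d.modify q.1 [] (fun l => l ++ [q.2])) PySem.Dict.empty := by
      rw [List.foldl_map]
    rw [h1, PySem.Dict.getD_foldl_modify_append]
    simp [List.filter_map, List.map_map, Function.comp_def]
  have hitems : dd.items = S.map g := by
    rw [PySem.Dict.items_eq_map_keys dd hnodup ([] : List (Int × Int)), hkeys]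
    apply List.map_congr_left
    intro k _
    rw [hgetD k]
  -- A is the sort of the key classes with at least two pairs
  have hA : find_equal_sum_pairs arr
      = PySem.List.sorted ((S.filter pd).map g) (fun x => x.1) := by
    show PySem.List.sorted (dd.items.filter (fun sp => decide (2 ≤ sp.2.length))) (fun x => x.1) = _
    rw [hitems, List.filter_map]
    rfl
  -- B side
  have hqpw : (PySem.List.sorted (pvPairs arr) (fun p => p.1 + p.2)).Pairwise
      (fun a b => a.1 + a.2 ≤ b.1 + b.2) := PySem.List.sorted_pairwise _ _
  obtain ⟨K, hKeq, hKpw, hKmem⟩ := pv_groupRuns_spec _ hqpw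
  have hgq : (fun s => (s, (PySem.List.sorted (pvPairs arr) (fun p => p.1 + p.2)).filter
      (fun p => p.1 + p.2 == s))) = g := by
    funext s
    show (_, _) = (_, _)
    rw [pv_sorted_filter_key (fun p => p.1 + p.2) s (pvPairs arr)]
  have hB : find_equal_sum_pairs_alt arr = (K.filter pd).map g := by
    show (pvGroupRuns (PySem.List.sorted (pvPairs arr) (fun p => p.1 + p.2))).filter
        (fun sp => decide (2 ≤ sp.2.length)) = _
    rw [hKeq, hgq, List.filter_map]
    rfl
  -- bring the two sides together
  have hKS : K.Perm S := by
    rw [List.perm_ext_iff_of_nodup (hKpw.imp ne_of_lt) (PySem.Set.nodup_ofList _)]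
    intro x
    rw [hKmem x, PySem.Set.mem_ofList]
    exact List.Perm.mem_iff (List.Perm.map _ (PySem.List.sorted_perm (pvPairs arr) _ false))
  rw [hA, hB]
  apply PySem.List.sorted_eq_of_perm_of_pairwise_lt
  · exact List.Perm.map g (List.Perm.filter pd hKS)
  · rw [List.pairwise_map]
    exact (hKpw.filter pd).imp (fun h => h)

-- ===== VERDICT (by name: the statement is the Claim_ definition above) =====
theorem find_equal_sum_pairs_spec : Claim_equal_find_equal_sum_pairs := by
  intro arr _ _
  unfold Spec_find_equal_sum_pairs
  exact pv_main arr
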